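-- pv_equiv track=rewrite | github.com/lewbei/storyforge-writer | storyforge/tools/ui_input.py | process_user_input
-- ===== SOURCE A (Python) =====
-- from typing import Dict, Any, List, Optional, Tuple
--
-- def process_user_input(messages: List[Dict[str, Any]], user_input: str) -> Tuple[str, Optional[str], bool, Optional[str]]:
--     """
--     Process a single user input and decide the action.
--
--     Returns a tuple: (action, normalized_input, skip_append, warning)
--     - action: one of {"exit", "help", "status", "projects", "files", "switch", "troubleshoot", "save", "resume", "new", "send"}
--     - normalized_input: for "send" action, the text to send to the model. For retry, it's the last user message.
--     - skip_append: if True, the caller must NOT append a new user message (used for retry behavior)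
--     - warning: optional warning string (e.g., retry without previous user message)
--     """
--     text = (user_input or "").strip()
--     if not text:
--         return ("noop", None, True, None)
--
--     low = text.lower()
--
--     # Exit
--     if low in ("/exit", "/quit", "q"):
--         return ("exit", None, True, None)
--
--     # Retry: reuse the last user message
--     if low in ("retry", "/retry"):
--         last_user = None
--         for m in reversed(messages or []):
--             if m.get("role") == "user":
--                 last_user = m.get("content")
--                 break
--         if not last_user:
--             return ("noop", None, True, "No previous user request to retry.")
--         return ("send", last_user, True, None)
--
--     # Help and other commands
--     if low == "/help":
--         return ("help", None, True, None)
--     if low == "/status":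
--         return ("status", None, True, None)
--     if low == "/projects":
--         return ("projects", None, True, None)
--     if low == "/files":
--         return ("files", None, True, None)
--     if low.startswith("/switch"):
--         return ("switch", text, True, None)
--     if low == "/troubleshoot":
--         return ("troubleshoot", None, True, None)
--     if low == "/save":
--         return ("save", None, True, None)
--     if low == "/resume":
--         return ("resume", None, True, None)
--     if low == "/new":
--         return ("new", None, True, None)
--     if low == "/brainstorm":
--         return ("brainstorm", None, True, None)
--     if low.startswith("/critique"):
--         return ("critique", text, True, None)
--     if low == "/dashboard":
--         return ("dashboard", None, True, None)
--     if low == "/context":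
--         return ("context", None, True, None)
--     if low == "/bible":
--         return ("bible", None, True, None)
--
--     # Default: send to model
--     return ("send", text, False, None)
-- ===== SOURCE B (Python) =====
-- # Table-driven dispatch: one rules list (match kind, patterns, action, mode)
-- # scanned by a single loop; retry uses a forward scan keeping the most recent
-- # user message instead of a reversed break scan.
-- _RULES = [
--     ("exact", ("/exit", "/quit", "q"), "exit", "const"),
--     ("exact", ("retry", "/retry"), "", "retry"),
--     ("exact", ("/help",), "help", "const"),
--     ("exact", ("/status",), "status", "const"),
--     ("exact", ("/projects",), "projects", "const"),
--     ("exact", ("/files",), "files", "const"),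
--     ("prefix", ("/switch",), "switch", "text"),
--     ("exact", ("/troubleshoot",), "troubleshoot", "const"),
--     ("exact", ("/save",), "save", "const"),
--     ("exact", ("/resume",), "resume", "const"),
--     ("exact", ("/new",), "new", "const"),
--     ("exact", ("/brainstorm",), "brainstorm", "const"),
--     ("prefix", ("/critique",), "critique", "text"),
--     ("exact", ("/dashboard",), "dashboard", "const"),
--     ("exact", ("/context",), "context", "const"),
--     ("exact", ("/bible",), "bible", "const"),
-- ]
--
--
-- def process_user_input(messages, user_input):
--     text = (user_input or "").strip()
--     if not text:
--         return ("noop", None, True, None)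
--     low = text.lower()
--     for kind, pats, action, mode in _RULES:
--         matched = (low in pats) if kind == "exact" else any(low.startswith(p) for p in pats)
--         if not matched:
--             continue
--         if mode == "const":
--             return (action, None, True, None)
--         if mode == "text":
--             return (action, text, True, None)
--         # mode == "retry": forward scan, last assignment wins
--         last_user = None
--         for m in (messages or []):
--             if m.get("role") == "user":
--                 last_user = m.get("content")
--         if not last_user:
--             return ("noop", None, True, "No previous user request to retry.")
--         return ("send", last_user, True, None)
--     return ("send", text, False, None)
-- ===== Notes on version B (the rewrite author's own statement) =====
-- stated objective: alternative
-- what changed: The if-chain is replaced by a declarative rules table (match-kind, patterns, action, mode) interpreted by one generic loop that handles exact and prefix commands uniformly, and the retry lookup scans the history forward keeping the most recent user message instead of breaking out of a reversed scan.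
import Mathlib
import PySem

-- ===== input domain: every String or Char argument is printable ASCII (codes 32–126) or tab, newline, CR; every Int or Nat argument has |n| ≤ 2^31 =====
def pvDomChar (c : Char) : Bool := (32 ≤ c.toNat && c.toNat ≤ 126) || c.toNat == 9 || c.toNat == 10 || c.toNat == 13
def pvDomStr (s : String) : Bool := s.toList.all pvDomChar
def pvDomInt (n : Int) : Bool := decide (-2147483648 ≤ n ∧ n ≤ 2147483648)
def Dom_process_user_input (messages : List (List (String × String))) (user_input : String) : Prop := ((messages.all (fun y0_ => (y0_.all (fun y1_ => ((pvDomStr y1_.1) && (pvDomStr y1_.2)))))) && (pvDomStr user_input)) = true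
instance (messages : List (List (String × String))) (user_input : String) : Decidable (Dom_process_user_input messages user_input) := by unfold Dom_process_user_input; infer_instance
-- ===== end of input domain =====

-- B replaces A's if-chain by a declarative rules table interpreted by one loop,
-- and replaces A's reversed break scan by a forward last-assignment scan (alternative decomposition); same results.

-- Python's m.get(k) on a dict represented as an association list (first match).
def dictGet (m : List (String × String)) (k : String) : Option String :=
  (m.find? (fun p => p.1 == k)).map (·.2)

-- Python's truthiness for an Optional[str]: None and "" are falsy.
def optStrFalsy : Option String → Bool
  | none => true
  | some s => s == ""

-- ===== PORT A =====
-- A's retry loop: for m in reversed(messages): if m.get("role")=="user": last_user = m.get("content"); break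
def lastUserScanA : List (List (String × String)) → Option String
  | [] => none
  | m :: rest =>
      if dictGet m "role" == some "user" then dictGet m "content"
      else lastUserScanA rest

def process_user_input (messages : List (List (String × String))) (user_input : String) : String × Option String × Bool × Option String :=
  let text := PySem.Str.strip user_input
  if text == "" then ("noop", none, true, none)
  else
    let low := PySem.Str.lower text
    if low == "/exit" || low == "/quit" || low == "q" then ("exit", none, true, none)
    else if low == "retry" || low == "/retry" then
      let last_user := lastUserScanA messages.reverse
      if optStrFalsy last_user then ("noop", none, true, some "No previous user request to retry.")
      else ("send", last_user, true, none)
    else if low == "/help" then ("help", none, true, none)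
    else if low == "/status" then ("status", none, true, none)
    else if low == "/projects" then ("projects", none, true, none)
    else if low == "/files" then ("files", none, true, none)
    else if PySem.Str.startswith low "/switch" then ("switch", text, true, none)
    else if low == "/troubleshoot" then ("troubleshoot", none, true, none)
    else if low == "/save" then ("save", none, true, none)
    else if low == "/resume" then ("resume", none, true, none)
    else if low == "/new" then ("new", none, true, none)
    else if low == "/brainstorm" then ("brainstorm", none, true, none)
    else if PySem.Str.startswith low "/critique" then ("critique", text, true, none)
    else if low == "/dashboard" then ("dashboard", none, true, none)
    else if low == "/context" then ("context", none, true, none)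
    else if low == "/bible" then ("bible", none, true, none)
    else ("send", text, false, none)

-- ===== PORT B =====
-- B's module-level rules table _RULES: (isPrefix, patterns, action, mode); mode 0="const", 1="text", 2="retry".
def bRules : List (Bool × List String × String × Nat) :=
  [ (false, ["/exit", "/quit", "q"], "exit", 0),
    (false, ["retry", "/retry"], "", 2),
    (false, ["/help"], "help", 0),
    (false, ["/status"], "status", 0),
    (false, ["/projects"], "projects", 0),
    (false, ["/files"], "files", 0),
    (true,  ["/switch"], "switch", 1),
    (false, ["/troubleshoot"], "troubleshoot", 0),
    (false, ["/save"], "save", 0),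
    (false, ["/resume"], "resume", 0),
    (false, ["/new"], "new", 0),
    (false, ["/brainstorm"], "brainstorm", 0),
    (true,  ["/critique"], "critique", 1),
    (false, ["/dashboard"], "dashboard", 0),
    (false, ["/context"], "context", 0),
    (false, ["/bible"], "bible", 0) ]

-- B's retry scan: forward loop, last assignment wins.
def lastUserForward (messages : List (List (String × String))) : Option String :=
  messages.foldl (fun acc m => if dictGet m "role" == some "user" then dictGet m "content" else acc) none

-- B's single loop over the rules table.
def runRules (messages : List (List (String × String))) (text low : String) :
    List (Bool × List String × String × Nat) → String × Option String × Bool × Option String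
  | [] => ("send", text, false, none)
  | (isPre, pats, action, mode) :: rest =>
      let matched := if isPre then pats.any (fun p => PySem.Str.startswith low p) else pats.contains low
      if matched then
        if mode == 0 then (action, none, true, none)
        else if mode == 1 then (action, text, true, none)
        else
          let last_user := lastUserForward messages
          if optStrFalsy last_user then ("noop", none, true, some "No previous user request to retry.")
          else ("send", last_user, true, none)
      else runRules messages text low rest

def process_user_input_alt (messages : List (List (String × String))) (user_input : String) : String × Option String × Bool × Option String :=
  let text := PySem.Str.strip user_input
  if text == "" then ("noop", none, true, none)
  else runRules messages text (PySem.Str.lower text) bRules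

-- ===== PRECONDITION & SPEC =====
def Spec_process_user_input (messages : List (List (String × String))) (user_input : String) (out : String × Option String × Bool × Option String) : Prop := out = process_user_input_alt messages user_input
instance (messages : List (List (String × String))) (user_input : String) (out : String × Option String × Bool × Option String) : Decidable (Spec_process_user_input messages user_input out) := by unfold Spec_process_user_input; infer_instance

-- ===== CLAIM (what is proved, stated in full; the proofs are below) =====
def Claim_equal_process_user_input : Prop := ∀ (messages : List (List (String × String))) (user_input : String), Dom_process_user_input messages user_input → Spec_process_user_input messages user_input (process_user_input messages user_input)

-- ===== LEMMAS AND PROOFS =====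

-- The forward last-assignment scan equals A's reversed break scan.
theorem lastUserForward_eq (l : List (List (String × String))) :
    lastUserForward l = lastUserScanA l.reverse := by
  induction l using List.reverseRecOn with
  | nil => rfl
  | append_singleton xs m ih =>
    simp only [lastUserForward, List.foldl_append, List.foldl_cons, List.foldl_nil,
      List.reverse_append, List.reverse_cons, List.reverse_nil, List.nil_append,
      List.cons_append, lastUserScanA]
    by_cases h : dictGet m "role" == some "user"
    · simp [h]
    · simpa [lastUserForward, h] using ih

-- ===== VERDICT (by name: the statement is the Claim_ definition above) =====
set_option maxHeartbeats 1000000 in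
set_option maxRecDepth 4096 in
theorem process_user_input_spec : Claim_equal_process_user_input := by
  intro messages user_input _
  unfold Spec_process_user_input process_user_input process_user_input_alt
  rw [← lastUserForward_eq]
  set text := PySem.Str.strip user_input with htext
  by_cases h0 : text == ""
  · simp [h0]
  simp only [h0, Bool.false_eq_true, if_false]
  set low := PySem.Str.lower text with hlow
  by_cases h0 : low = "/exit"
  · simp [h0, runRules, bRules]
  by_cases h1 : low = "/quit"
  · simp [h1, runRules, bRules]
  by_cases h2 : low = "q"
  · simp [h2, runRules, bRules]
  by_cases h3 : low = "retry"
  · simp [h3, runRules, bRules]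
  by_cases h4 : low = "/retry"
  · simp [h4, runRules, bRules]
  by_cases h5 : low = "/help"
  · simp [h5, runRules, bRules]
  by_cases h6 : low = "/status"
  · simp [h6, runRules, bRules]
  by_cases h7 : low = "/projects"
  · simp [h7, runRules, bRules]
  by_cases h8 : low = "/files"
  · simp [h8, runRules, bRules]
  by_cases h9 : low = "/troubleshoot"
  · simp [h9, runRules, bRules]
  by_cases h10 : low = "/save"
  · simp [h10, runRules, bRules]
  by_cases h11 : low = "/resume"
  · simp [h11, runRules, bRules]
  by_cases h12 : low = "/new"
  · simp [h12, runRules, bRules]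
  by_cases h13 : low = "/brainstorm"
  · simp [h13, runRules, bRules]
  by_cases h14 : low = "/dashboard"
  · simp [h14, runRules, bRules]
  by_cases h15 : low = "/context"
  · simp [h15, runRules, bRules]
  by_cases h16 : low = "/bible"
  · simp [h16, runRules, bRules]
  simp [runRules, bRules, h0, h1, h2, h3, h4, h5, h6, h7, h8, h9, h10, h11, h12, h13, h14, h15, h16]
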